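-- pv_equiv track=rewrite | github.com/Agentic-Environmental-Engineering/GymVerse | gem/gem/envs/example/logic_EntailmentSeeker_SuperPalindromicEnv_GEM_env.py | _compute_least_model
-- ===== SOURCE A (Python) =====
-- from typing import Tuple, Dict, Any, Optional, List, Set
--
-- def _compute_least_model(facts: Set[int], rules: List[Tuple[List[int], int]]) -> Set[int]:
--     true_set = set(facts)
--     changed = True
--     # Forward chaining until fixpoint
--     while changed:
--         changed = False
--         for body, head in rules:
--             if all(b in true_set for b in body):
--                 if head not in true_set:
--                     true_set.add(head)
--                     changed = True
--     return true_set
-- ===== SOURCE B (Python) =====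
-- def _compute_least_model(facts, rules):
--     true_set = set(facts)
--     # Dowling-Gallier propagation: per-rule counter of body atoms
--     # not yet processed, plus an index from atom to the rules mentioning it.
--     count = [len(body) for body, _ in rules]
--     watch = {}
--     for i, (body, _) in enumerate(rules):
--         for b in body:
--             watch.setdefault(b, []).append(i)
--     queue = list(true_set)
--     for i, (body, head) in enumerate(rules):
--         if count[i] == 0 and head not in true_set:
--             true_set.add(head)
--             queue.append(head)
--     qi = 0
--     while qi < len(queue):
--         a = queue[qi]
--         qi += 1
--         for i in watch.get(a, []):
--             count[i] -= 1
--             if count[i] == 0: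
--                 head = rules[i][1]
--                 if head not in true_set:
--                     true_set.add(head)
--                     queue.append(head)
--     return true_set
-- ===== Notes on version B (the rewrite author's own statement) =====
-- stated objective: alternative
-- what changed: Replaces repeated fixpoint passes over all rules by Dowling-Gallier propagation: a per-rule counter of unprocessed body atoms, an atom-to-rule index, and a worklist of newly true atoms, so each body occurrence is decremented once instead of being rescanned every pass.
import Mathlib
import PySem

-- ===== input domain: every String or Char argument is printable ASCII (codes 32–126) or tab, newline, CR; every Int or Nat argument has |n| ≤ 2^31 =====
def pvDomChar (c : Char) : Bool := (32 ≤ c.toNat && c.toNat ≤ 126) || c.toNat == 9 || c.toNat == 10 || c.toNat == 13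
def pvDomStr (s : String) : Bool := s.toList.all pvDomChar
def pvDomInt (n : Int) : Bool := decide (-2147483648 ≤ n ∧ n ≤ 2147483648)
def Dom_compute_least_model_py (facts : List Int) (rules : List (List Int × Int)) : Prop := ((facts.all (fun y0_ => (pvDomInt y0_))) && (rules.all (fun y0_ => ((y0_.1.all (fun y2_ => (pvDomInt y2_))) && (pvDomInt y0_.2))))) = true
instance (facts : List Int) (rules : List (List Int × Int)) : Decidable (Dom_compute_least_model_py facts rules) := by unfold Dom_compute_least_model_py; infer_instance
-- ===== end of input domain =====

-- B replaces A's repeated fixpoint passes by Dowling-Gallier counter/worklist propagation; a Python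
-- set has no observable element order, so both ports return the sorted representative of the result set.


-- ===== PORT A =====
-- one 'for body, head in rules' pass; state = (true_set, changed)
def pvStepA (st : List Int × Bool) (r : List Int × Int) : List Int × Bool :=
  if r.1.all (fun b => PySem.Set.contains st.1 b) then
    (if PySem.Set.contains st.1 r.2 then st else (PySem.Set.add st.1 r.2, true))
  else st

-- 'while changed' loop; fuel rules.length + 1 suffices: every changed pass adds at least one
-- rule head to the set, so at most rules.length changed passes occur (proved below).
def pvLoopA (rules : List (List Int × Int)) : Nat → List Int → List Int
  | 0, s => s
  | fuel+1, s =>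
      let res := rules.foldl pvStepA (s, false)
      if res.2 then pvLoopA rules fuel res.1 else res.1

def compute_least_model_py (facts : List Int) (rules : List (List Int × Int)) : List Int :=
  PySem.List.sorted (pvLoopA rules (rules.length + 1) (PySem.Set.ofList facts)) (fun x => x) false

-- ===== PORT B =====
-- watch: atom -> rule indices whose body mentions it (one entry per occurrence);
-- 'watch.setdefault(b, []).append(i)' is Dict.modify b [] (· ++ [i])
def pvWatch (rules : List (List Int × Int)) : PySem.Dict Int (List Int) :=
  (PySem.List.enumerate rules).foldl
    (fun w p => p.2.1.foldl (fun w b => PySem.Dict.modify w b [] (fun l => l ++ [p.1])) w)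
    PySem.Dict.empty

-- body of 'for i in watch.get(a, [])'; state = (count, true_set, pending queue tail)
def pvStepB (rules : List (List Int × Int)) (st : List Int × List Int × List Int) (i : Int) :
    List Int × List Int × List Int :=
  let c := PySem.List.pyGetD st.1 i 0 - 1
  let count := PySem.List.pySetD st.1 i c
  if c == 0 then
    let head := (PySem.List.pyGetD rules i ([], 0)).2
    if PySem.Set.contains st.2.1 head then (count, st.2.1, st.2.2)
    else (count, PySem.Set.add st.2.1 head, st.2.2 ++ [head])
  else (count, st.2.1, st.2.2)

-- 'while qi < len(queue)' with fuel; each processed atom was enqueued exactly once, so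
-- facts.length + rules.length + 1 iterations suffice (proved below)
def pvLoopB (rules : List (List Int × Int)) (watch : PySem.Dict Int (List Int)) :
    Nat → List Int → List Int → List Int → List Int
  | 0, _, ts, _ => ts
  | fuel+1, count, ts, q =>
      match q with
      | [] => ts
      | a :: rest =>
          let res := (watch.getD a []).foldl (pvStepB rules) (count, ts, rest)
          pvLoopB rules watch fuel res.1 res.2.1 res.2.2

-- 'queue = list(true_set)' iterates a Python set (order unmodelled); the returned SET does not
-- depend on the processing order, and the port seeds the queue in the set's insertion order.
def compute_least_model_py_alt (facts : List Int) (rules : List (List Int × Int)) : List Int :=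
  let ts0 := PySem.Set.ofList facts
  let count0 := rules.map (fun r => (r.1.length : Int))
  let st := (PySem.List.enumerate rules).foldl
    (fun (st : List Int × List Int) p =>
      if PySem.List.pyGetD count0 p.1 0 == 0 && !(PySem.Set.contains st.1 p.2.2)
      then (PySem.Set.add st.1 p.2.2, st.2 ++ [p.2.2])
      else st)
    (ts0, ts0)
  PySem.List.sorted (pvLoopB rules (pvWatch rules) (facts.length + rules.length + 1) count0 st.1 st.2)
    (fun x => x) false

-- ===== PRECONDITION & SPEC =====
def Spec_compute_least_model_py (facts : List Int) (rules : List (List Int × Int)) (out : List Int) : Prop := out = compute_least_model_py_alt facts rules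
instance (facts : List Int) (rules : List (List Int × Int)) (out : List Int) : Decidable (Spec_compute_least_model_py facts rules out) := by unfold Spec_compute_least_model_py; infer_instance

-- ===== CLAIM (what is proved, stated in full; the proofs are below) =====
def Claim_equal_compute_least_model_py : Prop := ∀ (facts : List Int) (rules : List (List Int × Int)), Dom_compute_least_model_py facts rules → Spec_compute_least_model_py facts rules (compute_least_model_py facts rules)

-- ===== LEMMAS AND PROOFS =====

-- x is a consequence of the facts under the Horn rules
inductive pvDeriv (facts : List Int) (rules : List (List Int × Int)) : Int → Prop
  | fact {x : Int} : x ∈ facts → pvDeriv facts rules x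
  | step {r : List Int × Int} : r ∈ rules → (∀ b ∈ r.1, pvDeriv facts rules b) → pvDeriv facts rules r.2

def pvClosed (rules : List (List Int × Int)) (s : List Int) : Prop :=
  ∀ r ∈ rules, (∀ b ∈ r.1, b ∈ s) → r.2 ∈ s

-- s is (a list representation of) the least model
def pvModels (facts : List Int) (rules : List (List Int × Int)) (s : List Int) : Prop :=
  s.Nodup ∧ (∀ x ∈ s, pvDeriv facts rules x) ∧ (∀ x ∈ facts, x ∈ s) ∧ pvClosed rules s

lemma pvDeriv_min {facts : List Int} {rules : List (List Int × Int)} {s : List Int}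
    (hf : ∀ x ∈ facts, x ∈ s) (hc : pvClosed rules s) :
    ∀ x, pvDeriv facts rules x → x ∈ s := by
  intro x hd
  induction hd with
  | fact h => exact hf _ h
  | step hr _ ih => exact hc _ hr ih

lemma pvModels_mem {facts : List Int} {rules : List (List Int × Int)} {s t : List Int} (hs : pvModels facts rules s)
    (ht : pvModels facts rules t) : ∀ x, x ∈ s ↔ x ∈ t := by
  intro x
  exact ⟨fun h => pvDeriv_min ht.2.2.1 ht.2.2.2 x (hs.2.1 x h),
         fun h => pvDeriv_min hs.2.2.1 hs.2.2.2 x (ht.2.1 x h)⟩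

-- the universe every reached atom lives in
def pvU (facts : List Int) (rules : List (List Int × Int)) : List Int :=
  PySem.Set.ofList (facts ++ rules.map (fun r => r.2))


lemma pvHead_mem_U {facts : List Int} {rules : List (List Int × Int)} {r : List Int × Int}
    (hr : r ∈ rules) : r.2 ∈ pvU facts rules := by
  have : r.2 ∈ rules.map (fun r => r.2) := List.mem_map.mpr ⟨r, hr, rfl⟩
  simp [pvU, PySem.Set.mem_ofList, this]

lemma pvPassA (facts : List Int) (rules : List (List Int × Int)) :
    ∀ (l : List (List Int × Int)) (s : List Int) (c : Bool),
      s.Nodup → (∀ x ∈ s, x ∈ pvU facts rules) → (∀ x ∈ s, pvDeriv facts rules x) →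
      (∀ r ∈ l, r ∈ rules) →
      ((∀ x ∈ s, x ∈ (l.foldl pvStepA (s, c)).1) ∧
       (l.foldl pvStepA (s, c)).1.Nodup ∧
       (∀ x ∈ (l.foldl pvStepA (s, c)).1, x ∈ pvU facts rules) ∧
       (∀ x ∈ (l.foldl pvStepA (s, c)).1, pvDeriv facts rules x) ∧
       ((l.foldl pvStepA (s, c)).2 = false →
          (l.foldl pvStepA (s, c)).1 = s ∧ c = false ∧
          ∀ r ∈ l, (∀ b ∈ r.1, b ∈ s) → r.2 ∈ s) ∧
       (c = false → (l.foldl pvStepA (s, c)).2 = true → s.length < (l.foldl pvStepA (s, c)).1.length))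
  | [], s, c, hnd, hU, hD, _ => by
      refine ⟨fun x hx => hx, hnd, hU, hD, fun _ => ⟨rfl, by assumption, by simp⟩, fun hc h2 => ?_⟩
      simp_all
  | r :: l, s, c, hnd, hU, hD, hl => by
      have hrr : r ∈ rules := hl r (by simp)
      have hl' : ∀ r' ∈ l, r' ∈ rules := fun r' h => hl r' (by simp [h])
      rw [List.foldl_cons]
      by_cases hb : (r.1.all (fun b => PySem.Set.contains s b)) = true
      · have hbody : ∀ b ∈ r.1, b ∈ s := by
          intro b hbm
          have := (List.all_eq_true.mp hb) b hbm
          simpa [PySem.Set.contains_iff] using this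
        by_cases hh : PySem.Set.contains s r.2 = true
        · have hstep : pvStepA (s, c) r = (s, c) := by
            simp only [pvStepA]; rw [if_pos hb, if_pos hh]
          rw [hstep]
          obtain ⟨h1, h2, h3, h4, h5, h6⟩ := pvPassA facts rules l s c hnd hU hD hl'
          refine ⟨h1, h2, h3, h4, fun hf => ?_, h6⟩
          obtain ⟨e1, e2, e3⟩ := h5 hf
          refine ⟨e1, e2, ?_⟩
          intro r' hr'
          rcases List.mem_cons.mp hr' with rfl | hm
          · exact fun _ => (PySem.Set.contains_iff _ _).mp hh
          · exact e3 r' hm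
        · have hnm : r.2 ∉ s := fun hm => hh ((PySem.Set.contains_iff _ _).mpr hm)
          have hstep : pvStepA (s, c) r = (PySem.Set.add s r.2, true) := by
            simp only [pvStepA]; rw [if_pos hb, if_neg hh]
          rw [hstep]
          have hadd : PySem.Set.add s r.2 = s ++ [r.2] := by simp [PySem.Set.add, hnm]
          have hnd' : (PySem.Set.add s r.2).Nodup := PySem.Set.nodup_add s r.2 hnd
          have hsub : ∀ x ∈ s, x ∈ PySem.Set.add s r.2 := by
            intro x hx; rw [PySem.Set.mem_add]; exact Or.inl hx
          have hU' : ∀ x ∈ PySem.Set.add s r.2, x ∈ pvU facts rules := by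
            intro x hx
            rcases (PySem.Set.mem_add _ _ _).mp hx with h | rfl
            · exact hU x h
            · exact pvHead_mem_U hrr
          have hD' : ∀ x ∈ PySem.Set.add s r.2, pvDeriv facts rules x := by
            intro x hx
            rcases (PySem.Set.mem_add _ _ _).mp hx with h | rfl
            · exact hD x h
            · exact pvDeriv.step hrr (fun b hbm => hD b (hbody b hbm))
          obtain ⟨h1, h2, h3, h4, h5, _⟩ := pvPassA facts rules l (PySem.Set.add s r.2) true hnd' hU' hD' hl'
          refine ⟨fun x hx => h1 x (hsub x hx), h2, h3, h4, fun hf => ?_, fun hc _ => ?_⟩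
          · obtain ⟨_, e2, _⟩ := h5 hf; cases e2
          · have hlen : s.length < (PySem.Set.add s r.2).length := by
              simp [hadd]
            have hle : (PySem.Set.add s r.2).length ≤ (l.foldl pvStepA (PySem.Set.add s r.2, true)).1.length :=
              (List.subperm_of_subset hnd' (fun x hx => h1 x hx)).length_le
            omega
      · have hstep : pvStepA (s, c) r = (s, c) := by
          simp only [pvStepA]; rw [if_neg hb]
        rw [hstep]
        obtain ⟨h1, h2, h3, h4, h5, h6⟩ := pvPassA facts rules l s c hnd hU hD hl'
        refine ⟨h1, h2, h3, h4, fun hf => ?_, h6⟩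
        obtain ⟨e1, e2, e3⟩ := h5 hf
        refine ⟨e1, e2, ?_⟩
        intro r' hr'
        rcases List.mem_cons.mp hr' with rfl | hm
        · intro hall
          exfalso
          exact hb (List.all_eq_true.mpr (fun b hbm => by
            simpa [PySem.Set.contains_iff] using hall b hbm))
        · exact e3 r' hm

lemma pvLoopA_spec (facts : List Int) (rules : List (List Int × Int)) :
    ∀ (fuel : Nat) (s : List Int),
      s.Nodup → (∀ x ∈ s, x ∈ pvU facts rules) → (∀ x ∈ s, pvDeriv facts rules x) →
      (pvU facts rules).length < fuel + s.length →
      ((∀ x ∈ s, x ∈ pvLoopA rules fuel s) ∧ (pvLoopA rules fuel s).Nodup ∧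
       (∀ x ∈ pvLoopA rules fuel s, pvDeriv facts rules x) ∧ pvClosed rules (pvLoopA rules fuel s))
  | 0, s, hnd, hU, _, hfuel => by
      exfalso
      have := (List.subperm_of_subset hnd (fun x hx => hU x hx)).length_le
      omega
  | fuel+1, s, hnd, hU, hD, hfuel => by
      obtain ⟨h1, h2, h3, h4, h5, h6⟩ := pvPassA facts rules rules s false hnd hU hD (fun r h => h)
      simp only [pvLoopA]
      by_cases hch : (rules.foldl pvStepA (s, false)).2 = true
      · rw [if_pos hch]
        have hlen := h6 rfl hch
        obtain ⟨g1, g2, g3, g4⟩ := pvLoopA_spec facts rules fuel _ h2 h3 h4 (by omega)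
        exact ⟨fun x hx => g1 x (h1 x hx), g2, g3, g4⟩
      · rw [if_neg hch]
        obtain ⟨e1, _, e3⟩ := h5 (by simpa using hch)
        rw [e1]
        exact ⟨fun x hx => hx, hnd, hD, e3⟩

lemma pvFoldl_add_length_le (ys : List Int) :
    ∀ (s : List Int), (ys.foldl PySem.Set.add s).length ≤ s.length + ys.length := by
  induction ys with
  | nil => intro s; simp
  | cons y ys ih =>
      intro s
      have h1 : (PySem.Set.add s y).length ≤ s.length + 1 := by
        simp only [PySem.Set.add]; split <;> simp
      have := ih (PySem.Set.add s y)
      simp only [List.foldl_cons, List.length_cons]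
      omega

lemma pvModels_A (facts : List Int) (rules : List (List Int × Int)) :
    pvModels facts rules (pvLoopA rules (rules.length + 1) (PySem.Set.ofList facts)) := by
  have hnd : (PySem.Set.ofList facts).Nodup := PySem.Set.nodup_ofList _
  have hU : ∀ x ∈ PySem.Set.ofList facts, x ∈ pvU facts rules := by
    intro x hx
    have : x ∈ facts := (PySem.Set.mem_ofList _ _).mp hx
    simp [pvU, PySem.Set.mem_ofList, this]
  have hD : ∀ x ∈ PySem.Set.ofList facts, pvDeriv facts rules x := by
    intro x hx
    exact pvDeriv.fact ((PySem.Set.mem_ofList _ _).mp hx)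
  have hlen : (pvU facts rules).length < rules.length + 1 + (PySem.Set.ofList facts).length := by
    have h1 : (pvU facts rules).length ≤ (PySem.Set.ofList facts).length + rules.length := by
      have : pvU facts rules = (rules.map (fun r => r.2)).foldl PySem.Set.add (PySem.Set.ofList facts) := by
        simp [pvU, PySem.Set.ofList_eq_foldl, List.foldl_append]
      rw [this]
      have := pvFoldl_add_length_le (rules.map (fun r => r.2)) (PySem.Set.ofList facts)
      simpa using this
    omega
  obtain ⟨g1, g2, g3, g4⟩ := pvLoopA_spec facts rules (rules.length + 1) _ hnd hU hD hlen
  exact ⟨g2, g3, fun x hx => g1 x ((PySem.Set.mem_ofList _ _).mpr hx), g4⟩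


-- ---- watch characterization ----

-- the spec of watch[a]: for each rule (in order) its index, once per occurrence of a in its body
def pvWL (rules : List (List Int × Int)) (s : Int) (a : Int) : List Int :=
  (PySem.List.enumerate rules s).flatMap (fun p => List.replicate (p.2.1.count a) p.1)

lemma pvWatch_body (i a : Int) :
    ∀ (body : List Int) (w : PySem.Dict Int (List Int)),
      (body.foldl (fun w b => PySem.Dict.modify w b [] (fun l => l ++ [i])) w).getD a []
        = w.getD a [] ++ List.replicate (body.count a) i
  | [], w => by simp
  | b :: body, w => by
      rw [List.foldl_cons, pvWatch_body i a body]
      by_cases hba : b = a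
      · subst hba
        rw [PySem.Dict.getD_modify_self]
        have : (b :: body).count b = body.count b + 1 := by simp
        rw [this, List.replicate_succ]
        simp
      · rw [PySem.Dict.getD_modify_of_ne _ _ _ (fun h => hba h.symm)]
        have : (b :: body).count a = body.count a := by simp [hba]
        rw [this]

lemma pvWatch_fold (a : Int) :
    ∀ (L : List (Int × (List Int × Int))) (w : PySem.Dict Int (List Int)),
      (L.foldl (fun w p => p.2.1.foldl (fun w b => PySem.Dict.modify w b [] (fun l => l ++ [p.1])) w) w).getD a []
        = w.getD a [] ++ L.flatMap (fun p => List.replicate (p.2.1.count a) p.1)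
  | [], w => by simp
  | p :: L, w => by
      rw [List.foldl_cons, pvWatch_fold a L, pvWatch_body p.1 a]
      simp

lemma pvWatch_getD (rules : List (List Int × Int)) (a : Int) :
    (pvWatch rules).getD a [] = pvWL rules 0 a := by
  rw [pvWatch, pvWatch_fold a, pvWL]
  simp [PySem.Dict.getD_empty]

lemma pvWL_mem {a i : Int} :
    ∀ {rules : List (List Int × Int)} {s : Int}, i ∈ pvWL rules s a →
      ∃ k : Nat, k < rules.length ∧ i = s + (k : Int)
  | [], s, h => by simp [pvWL] at h
  | r :: rules, s, h => by
      rw [pvWL, PySem.List.enumerate_cons] at h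
      simp only [List.flatMap_cons] at h
      rcases List.mem_append.mp h with h | h
      · exact ⟨0, by simp, by simpa using List.eq_of_mem_replicate h⟩
      · obtain ⟨k, hk, hi⟩ := pvWL_mem (rules := rules) (s := s + 1) h
        exact ⟨k + 1, by simpa using hk, by push_cast; omega⟩

lemma pvWL_count (a : Int) :
    ∀ (rules : List (List Int × Int)) (s : Int) (k : Nat) (h : k < rules.length),
      (pvWL rules s a).count (s + (k : Int)) = (rules[k].1).count a
  | [], s, k, h => by simp at h
  | r :: rules, s, 0, h => by
      rw [pvWL, PySem.List.enumerate_cons]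
      simp only [List.flatMap_cons, List.count_append, Nat.cast_zero, add_zero]
      have h1 : (List.replicate (r.1.count a) s).count s = r.1.count a :=
        List.count_replicate_self
      have h2 : ((pvWL rules (s + 1) a).count s) = 0 := by
        rw [List.count_eq_zero]
        intro hmem
        obtain ⟨k, _, hk⟩ := pvWL_mem hmem
        omega
      rw [pvWL] at h2
      simp [h1, h2]
  | r :: rules, s, k+1, h => by
      rw [pvWL, PySem.List.enumerate_cons]
      simp only [List.flatMap_cons, List.count_append]
      have h1 : (List.replicate (r.1.count a) s).count (s + 1 + (k:Int)) = 0 := by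
        rw [List.count_eq_zero]
        intro hmem
        have := List.eq_of_mem_replicate hmem
        omega
      have h2 := pvWL_count a rules (s + 1) k (by simpa using h)
      have he : s + ((k:Int) + 1) = (s + 1) + (k:Int) := by ring
      rw [pvWL] at h2
      push_cast
      rw [he, h1, h2]
      simp


-- ---- counter invariant machinery ----

-- number of body atoms not yet processed (processed = in ts and no longer queued)
def pvCnt (ts q body : List Int) : Nat := body.countP (fun b => decide (b ∉ ts ∨ b ∈ q))

def pvMiss (rules : List (List Int × Int)) (ts : List Int) : Nat :=
  ((rules.map (fun r => r.2)).toFinset \ ts.toFinset).card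

lemma pvCnt_pop {ts q : List Int} {a : Int} (ha : a ∈ ts) (haq : a ∉ q) :
    ∀ body : List Int, pvCnt ts (a :: q) body = pvCnt ts q body + body.count a
  | [] => by simp [pvCnt]
  | b :: body => by
      have ih := pvCnt_pop ha haq body
      simp only [pvCnt, List.countP_cons, List.count_cons] at ih ⊢
      rw [ih]
      by_cases hba : b = a
      · subst hba
        have e1 : decide (b ∉ ts ∨ b ∈ b :: q) = true := by simp
        have e2 : decide (b ∉ ts ∨ b ∈ q) = false := by simp [ha, haq]
        rw [e1, e2]
        simp
        omega
      · have e : decide (b ∉ ts ∨ b ∈ a :: q) = decide (b ∉ ts ∨ b ∈ q) := by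
          simp [hba]
        have e2 : (b == a) = false := by simp [hba]
        rw [e, e2]
        simp
        omega

lemma pvCnt_add_both {ts q : List Int} {h : Int} (hh : h ∉ ts) (body : List Int) :
    pvCnt (ts ++ [h]) (q ++ [h]) body = pvCnt ts q body := by
  unfold pvCnt
  apply List.countP_congr
  intro b hb
  by_cases hbh : b = h
  · subst hbh; simp [hh]
  · simp [hbh]

lemma pvCnt_all_mem {ts q body : List Int} (h : pvCnt ts q body = 0) :
    ∀ b ∈ body, b ∈ ts := by
  intro b hb
  have := List.countP_eq_zero.mp h b hb
  simp at this
  exact this.1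

lemma pvGetD_set {l : List Int} {k : Nat} (_ : k < l.length) (c : Int) (j : Nat) (hj : j < l.length) :
    (l.set k c).getD j 0 = if j = k then c else l.getD j 0 := by
  rw [List.getD_eq_getElem _ _ (by simpa using hj), List.getElem_set]
  by_cases hjk : j = k
  · simp [hjk]
  · rw [if_neg (fun h => hjk h.symm), if_neg hjk, List.getD_eq_getElem _ _ hj]

-- loop invariant while processing the pending occurrence list idxs of the popped atom a
structure PvInv (facts : List Int) (rules : List (List Int × Int)) (a : Int) (idxs : List Int)
    (st : List Int × List Int × List Int) : Prop where
  ndts : st.2.1.Nodup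
  ndq : st.2.2.Nodup
  qsub : ∀ x ∈ st.2.2, x ∈ st.2.1
  amem : a ∈ st.2.1
  anq : a ∉ st.2.2
  hU : ∀ x ∈ st.2.1, x ∈ pvU facts rules
  hD : ∀ x ∈ st.2.1, pvDeriv facts rules x
  clen : st.1.length = rules.length
  vidx : ∀ i ∈ idxs, ∃ k : Nat, k < rules.length ∧ i = (k : Int)
  cnt : ∀ (k : Nat) (h : k < rules.length),
    st.1.getD k 0 = (pvCnt st.2.1 st.2.2 (rules[k].1) : Int) + (idxs.count (k : Int) : Int)
  fire : ∀ (k : Nat) (h : k < rules.length), st.1.getD k 0 = 0 → rules[k].2 ∈ st.2.1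

lemma pvInnerB (facts : List Int) (rules : List (List Int × Int)) (a : Int) :
    ∀ (idxs : List Int) (st : List Int × List Int × List Int),
      PvInv facts rules a idxs st →
      (PvInv facts rules a [] (idxs.foldl (pvStepB rules) st) ∧
       (∀ x ∈ st.2.1, x ∈ (idxs.foldl (pvStepB rules) st).2.1) ∧
       (idxs.foldl (pvStepB rules) st).2.2.length + pvMiss rules (idxs.foldl (pvStepB rules) st).2.1
         ≤ st.2.2.length + pvMiss rules st.2.1)
  | [], st, inv => ⟨inv, fun x hx => hx, le_refl _⟩
  | i :: idxs, st, inv => by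
      obtain ⟨k, hk, rfl⟩ := inv.vidx i (by simp)
      obtain ⟨count, ts, q⟩ := st
      have hkc : k < count.length := by rw [inv.clen]; exact hk
      have hgd : PySem.List.pyGetD count ((k : Nat) : Int) 0 = count.getD k 0 :=
        PySem.List.pyGetD_natCast _ _ _
      have hrd : PySem.List.pyGetD rules ((k : Nat) : Int) ([], 0) = rules[k] := by
        rw [PySem.List.pyGetD_natCast, List.getD_eq_getElem _ _ (by simpa using hk)]
      have hcnt := inv.cnt k hk
      have hcount_cons : (((k : Nat) : Int) :: idxs).count ((k : Nat) : Int) = idxs.count ((k : Nat) : Int) + 1 := by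
        simp
      rw [hcount_cons] at hcnt
      -- the decremented counter value
      set c : Int := count.getD k 0 - 1 with hc
      have hcval : c = (pvCnt ts q (rules[k].1) : Int) + (idxs.count ((k : Nat) : Int) : Int) := by
        rw [hc, hcnt]; push_cast; ring
      have hcnt' : ∀ (j : Nat) (h : j < rules.length),
          (count.set k c).getD j 0 = (pvCnt ts q (rules[j].1) : Int) + (idxs.count ((j : Nat) : Int) : Int) := by
        intro j hj
        rw [pvGetD_set hkc c j (by rw [inv.clen]; exact hj)]
        by_cases hjk : j = k
        · subst hjk; rw [if_pos rfl, hcval]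
        · rw [if_neg hjk, inv.cnt j hj]
          have : (((k : Nat) : Int) :: idxs).count ((j : Nat) : Int) = idxs.count ((j : Nat) : Int) := by
            simp [List.count_cons]
            omega
          rw [this]
      have hclen' : (count.set k c).length = rules.length := by simp [inv.clen]
      by_cases hc0 : c = 0
      · -- the counter of rule k dropped to zero: fire it
        have hz : pvCnt ts q (rules[k].1) = 0 ∧ idxs.count ((k : Nat) : Int) = 0 := by
          rw [hcval] at hc0; omega
        have hbody : ∀ b ∈ rules[k].1, b ∈ ts := pvCnt_all_mem hz.1
        have hderiv : pvDeriv facts rules (rules[k].2) :=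
          pvDeriv.step (List.getElem_mem hk) (fun b hb => inv.hD b (hbody b hb))
        by_cases hmem : rules[k].2 ∈ ts
        · have hstep : pvStepB rules (count, ts, q) ((k : Nat) : Int) = (count.set k c, ts, q) := by
            have hcc : count.getD k 0 - 1 = 0 := by rw [← hc]; exact hc0
            simp only [pvStepB, hgd, hrd, PySem.List.pySetD_natCast, ← hc]
            rw [if_pos (by simpa using hcc), if_pos ((PySem.Set.contains_iff _ _).mpr hmem)]
          rw [List.foldl_cons, hstep]
          apply pvInnerB facts rules a idxs
          exact { ndts := inv.ndts, ndq := inv.ndq, qsub := inv.qsub, amem := inv.amem,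
                  anq := inv.anq, hU := inv.hU, hD := inv.hD, clen := hclen',
                  vidx := fun i hi => inv.vidx i (by simp [hi]),
                  cnt := hcnt',
                  fire := by
                    intro j hj hj0
                    by_cases hjk : j = k
                    · subst hjk; exact hmem
                    · apply inv.fire j hj
                      rw [pvGetD_set hkc c j (by rw [inv.clen]; exact hj), if_neg hjk] at hj0
                      exact hj0 }
        · -- new atom: extend true_set and queue
          have hstep : pvStepB rules (count, ts, q) ((k : Nat) : Int) =
              (count.set k c, ts ++ [rules[k].2], q ++ [rules[k].2]) := by
            have hcc : count.getD k 0 - 1 = 0 := by rw [← hc]; exact hc0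
            simp only [pvStepB, hgd, hrd, PySem.List.pySetD_natCast, ← hc]
            rw [if_pos (by simpa using hcc),
                if_neg (fun h => hmem ((PySem.Set.contains_iff _ _).mp h))]
            have hadd : PySem.Set.add ts (rules[k].2) = ts ++ [rules[k].2] := by
              simp [PySem.Set.add, hmem]
            rw [hadd]
          rw [List.foldl_cons, hstep]
          have hnew : rules[k].2 ∉ q := fun h => hmem (inv.qsub _ h)
          obtain ⟨inv', mono', meas'⟩ := pvInnerB facts rules a idxs (count.set k c, ts ++ [rules[k].2], q ++ [rules[k].2])
            { ndts := by
                rw [List.nodup_append]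
                refine ⟨inv.ndts, List.nodup_singleton _, ?_⟩
                intro x hx y hy he
                rw [List.mem_singleton] at hy
                subst hy
                subst he
                exact hmem hx
              ndq := by
                rw [List.nodup_append]
                refine ⟨inv.ndq, List.nodup_singleton _, ?_⟩
                intro x hx y hy he
                rw [List.mem_singleton] at hy
                subst hy
                subst he
                exact hnew hx
              qsub := by
                intro x hx
                rcases List.mem_append.mp hx with h | h
                · exact List.mem_append.mpr (Or.inl (inv.qsub x h))
                · exact List.mem_append.mpr (Or.inr h)
              amem := List.mem_append.mpr (Or.inl inv.amem)
              anq := by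
                intro hx
                rcases List.mem_append.mp hx with h | h
                · exact inv.anq h
                · have ha : a = rules[k].2 := by simpa using h
                  exact hmem (ha ▸ inv.amem)
              hU := by
                intro x hx
                rcases List.mem_append.mp hx with h | h
                · exact inv.hU x h
                · have : x = rules[k].2 := by simpa using h
                  subst this
                  exact pvHead_mem_U (List.getElem_mem hk)
              hD := by
                intro x hx
                rcases List.mem_append.mp hx with h | h
                · exact inv.hD x h
                · have : x = rules[k].2 := by simpa using h
                  subst this
                  exact hderiv
              clen := hclen'
              vidx := fun i hi => inv.vidx i (by simp [hi])
              cnt := by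
                intro j hj
                rw [hcnt' j hj, pvCnt_add_both hmem]
              fire := by
                intro j hj hj0
                by_cases hjk : j = k
                · subst hjk; exact List.mem_append.mpr (Or.inr (by simp))
                · rw [pvGetD_set hkc c j (by rw [inv.clen]; exact hj), if_neg hjk] at hj0
                  exact List.mem_append.mpr (Or.inl (inv.fire j hj hj0)) }
          refine ⟨inv', fun x hx => mono' x (List.mem_append.mpr (Or.inl hx)), ?_⟩
          -- measure: the queue grew by one but the missing-head count dropped by one
          have hheadmem : rules[k].2 ∈ (rules.map (fun r => r.2)).toFinset \ ts.toFinset := by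
            simp only [Finset.mem_sdiff, List.mem_toFinset]
            exact ⟨List.mem_map.mpr ⟨rules[k], List.getElem_mem hk, rfl⟩, hmem⟩
          have hsd : (rules.map (fun r => r.2)).toFinset \ (ts ++ [rules[k].2]).toFinset
              = ((rules.map (fun r => r.2)).toFinset \ ts.toFinset).erase (rules[k].2) := by
            ext x
            simp only [Finset.mem_sdiff, Finset.mem_erase, List.mem_toFinset, List.mem_append,
              List.mem_singleton]
            tauto
          have hcard : pvMiss rules (ts ++ [rules[k].2]) = pvMiss rules ts - 1 := by
            unfold pvMiss
            rw [hsd, Finset.card_erase_of_mem hheadmem]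
          have hpos : 1 ≤ pvMiss rules ts := by
            unfold pvMiss
            exact Finset.card_pos.mpr ⟨_, hheadmem⟩
          have hlen : (q ++ [rules[k].2]).length = q.length + 1 := by simp
          dsimp only at meas' ⊢
          rw [hlen, hcard] at meas'
          omega
      · -- counter still positive: only the decrement happened
        have hstep : pvStepB rules (count, ts, q) ((k : Nat) : Int) = (count.set k c, ts, q) := by
          simp only [pvStepB, hgd, PySem.List.pySetD_natCast, ← hc]
          rw [if_neg (by intro h; apply hc0; rw [hc]; simpa using h)]
        rw [List.foldl_cons, hstep]
        apply pvInnerB facts rules a idxs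
        exact { ndts := inv.ndts, ndq := inv.ndq, qsub := inv.qsub, amem := inv.amem,
                anq := inv.anq, hU := inv.hU, hD := inv.hD, clen := hclen',
                vidx := fun i hi => inv.vidx i (by simp [hi]),
                cnt := hcnt',
                fire := by
                  intro j hj hj0
                  by_cases hjk : j = k
                  · subst hjk
                    rw [pvGetD_set hkc c j (by rw [inv.clen]; exact hk), if_pos rfl] at hj0
                    exact absurd hj0 hc0
                  · apply inv.fire j hj
                    rw [pvGetD_set hkc c j (by rw [inv.clen]; exact hj), if_neg hjk] at hj0
                    exact hj0 }


-- loop-level invariant: counters match the unprocessed-occurrence counts wrt (true_set, queue)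
structure PvInvQ (facts : List Int) (rules : List (List Int × Int))
    (st : List Int × List Int × List Int) : Prop where
  ndts : st.2.1.Nodup
  ndq : st.2.2.Nodup
  qsub : ∀ x ∈ st.2.2, x ∈ st.2.1
  hU : ∀ x ∈ st.2.1, x ∈ pvU facts rules
  hD : ∀ x ∈ st.2.1, pvDeriv facts rules x
  clen : st.1.length = rules.length
  cnt : ∀ (k : Nat) (h : k < rules.length),
    st.1.getD k 0 = (pvCnt st.2.1 st.2.2 (rules[k].1) : Int)
  fire : ∀ (k : Nat) (h : k < rules.length), st.1.getD k 0 = 0 → rules[k].2 ∈ st.2.1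

lemma pvLoopB_spec (facts : List Int) (rules : List (List Int × Int))
    (watch : PySem.Dict Int (List Int)) (hw : ∀ a, watch.getD a [] = pvWL rules 0 a) :
    ∀ (fuel : Nat) (count ts q : List Int), PvInvQ facts rules (count, ts, q) →
      q.length + pvMiss rules ts < fuel →
      ((∀ x ∈ ts, x ∈ pvLoopB rules watch fuel count ts q) ∧
       (pvLoopB rules watch fuel count ts q).Nodup ∧
       (∀ x ∈ pvLoopB rules watch fuel count ts q, pvDeriv facts rules x) ∧
       pvClosed rules (pvLoopB rules watch fuel count ts q))
  | 0, count, ts, q, _, hf => absurd hf (by omega)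
  | fuel+1, count, ts, [], inv, _ => by
      simp only [pvLoopB]
      refine ⟨fun x hx => hx, inv.ndts, inv.hD, ?_⟩
      intro r hr hbody
      obtain ⟨k, hk, hkr⟩ := List.mem_iff_getElem.mp hr
      have hc : pvCnt ts [] r.1 = 0 := by
        apply List.countP_eq_zero.mpr
        intro b hb
        simp [hbody b hb]
      have := inv.fire k hk
      rw [inv.cnt k hk, hkr] at this
      exact this (by rw [hc]; rfl)
  | fuel+1, count, ts, a :: rest, inv, hf => by
      have hats : a ∈ ts := inv.qsub a (by simp)
      have hanr : a ∉ rest := (List.nodup_cons.mp inv.ndq).1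
      have hinv : PvInv facts rules a (pvWL rules 0 a) (count, ts, rest) :=
        { ndts := inv.ndts
          ndq := (List.nodup_cons.mp inv.ndq).2
          qsub := fun x hx => inv.qsub x (by simp [hx])
          amem := hats
          anq := hanr
          hU := inv.hU
          hD := inv.hD
          clen := inv.clen
          vidx := by
            intro i hi
            obtain ⟨k, hk, hik⟩ := pvWL_mem hi
            exact ⟨k, hk, by omega⟩
          cnt := by
            intro k hk
            rw [inv.cnt k hk, pvCnt_pop hats hanr]
            have hcw : (pvWL rules 0 a).count ((k : Nat) : Int) = (rules[k].1).count a := by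
              have := pvWL_count a rules 0 k hk
              simpa using this
            rw [hcw]
            push_cast
            ring
          fire := inv.fire }
      obtain ⟨inv', mono', meas'⟩ := pvInnerB facts rules a (pvWL rules 0 a) (count, ts, rest) hinv
      simp only [pvLoopB, hw a]
      have hinvQ : PvInvQ facts rules ((pvWL rules 0 a).foldl (pvStepB rules) (count, ts, rest)) :=
        { ndts := inv'.ndts, ndq := inv'.ndq, qsub := inv'.qsub, hU := inv'.hU, hD := inv'.hD,
          clen := inv'.clen,
          cnt := by
            intro k hk
            have := inv'.cnt k hk
            simpa using this
          fire := inv'.fire }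
      have hmeas : ((pvWL rules 0 a).foldl (pvStepB rules) (count, ts, rest)).2.2.length +
          pvMiss rules ((pvWL rules 0 a).foldl (pvStepB rules) (count, ts, rest)).2.1 < fuel := by
        dsimp only at meas'
        have : (a :: rest).length = rest.length + 1 := by simp
        omega
      obtain ⟨g1, g2, g3, g4⟩ := pvLoopB_spec facts rules watch hw fuel _ _ _ hinvQ hmeas
      exact ⟨fun x hx => g1 x (mono' x hx), g2, g3, g4⟩

lemma pvInitB (facts : List Int) (rules : List (List Int × Int)) (count0 : List Int) :
    ∀ (L : List (Int × (List Int × Int))) (ts q : List Int),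
      ts.Nodup → (∀ x, x ∈ ts ↔ x ∈ q) → q.Nodup →
      (∀ x ∈ ts, x ∈ pvU facts rules) → (∀ x ∈ ts, pvDeriv facts rules x) →
      (∀ p ∈ L, PySem.List.pyGetD count0 p.1 0 = 0 → pvDeriv facts rules p.2.2 ∧ p.2 ∈ rules) →
      ((L.foldl (fun (st : List Int × List Int) p =>
          if PySem.List.pyGetD count0 p.1 0 == 0 && !(PySem.Set.contains st.1 p.2.2)
          then (PySem.Set.add st.1 p.2.2, st.2 ++ [p.2.2]) else st) (ts, q)).1.Nodup ∧
       (∀ x, x ∈ (L.foldl (fun (st : List Int × List Int) p =>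
          if PySem.List.pyGetD count0 p.1 0 == 0 && !(PySem.Set.contains st.1 p.2.2)
          then (PySem.Set.add st.1 p.2.2, st.2 ++ [p.2.2]) else st) (ts, q)).1 ↔
             x ∈ (L.foldl (fun (st : List Int × List Int) p =>
          if PySem.List.pyGetD count0 p.1 0 == 0 && !(PySem.Set.contains st.1 p.2.2)
          then (PySem.Set.add st.1 p.2.2, st.2 ++ [p.2.2]) else st) (ts, q)).2) ∧
       (L.foldl (fun (st : List Int × List Int) p =>
          if PySem.List.pyGetD count0 p.1 0 == 0 && !(PySem.Set.contains st.1 p.2.2)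
          then (PySem.Set.add st.1 p.2.2, st.2 ++ [p.2.2]) else st) (ts, q)).2.Nodup ∧
       (∀ x ∈ (L.foldl (fun (st : List Int × List Int) p =>
          if PySem.List.pyGetD count0 p.1 0 == 0 && !(PySem.Set.contains st.1 p.2.2)
          then (PySem.Set.add st.1 p.2.2, st.2 ++ [p.2.2]) else st) (ts, q)).1, x ∈ pvU facts rules) ∧
       (∀ x ∈ (L.foldl (fun (st : List Int × List Int) p =>
          if PySem.List.pyGetD count0 p.1 0 == 0 && !(PySem.Set.contains st.1 p.2.2)
          then (PySem.Set.add st.1 p.2.2, st.2 ++ [p.2.2]) else st) (ts, q)).1, pvDeriv facts rules x) ∧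
       (∀ x ∈ ts, x ∈ (L.foldl (fun (st : List Int × List Int) p =>
          if PySem.List.pyGetD count0 p.1 0 == 0 && !(PySem.Set.contains st.1 p.2.2)
          then (PySem.Set.add st.1 p.2.2, st.2 ++ [p.2.2]) else st) (ts, q)).1) ∧
       (∀ p ∈ L, PySem.List.pyGetD count0 p.1 0 = 0 → p.2.2 ∈ (L.foldl (fun (st : List Int × List Int) p =>
          if PySem.List.pyGetD count0 p.1 0 == 0 && !(PySem.Set.contains st.1 p.2.2)
          then (PySem.Set.add st.1 p.2.2, st.2 ++ [p.2.2]) else st) (ts, q)).1))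
  | [], ts, q, hnd, hiff, hndq, hU, hD, _ => by
      exact ⟨hnd, hiff, hndq, hU, hD, fun x hx => hx, by simp⟩
  | p :: L, ts, q, hnd, hiff, hndq, hU, hD, hder => by
      rw [List.foldl_cons]
      by_cases hz : PySem.List.pyGetD count0 p.1 0 = 0
      · by_cases hm : p.2.2 ∈ ts
        · have hguard : (PySem.List.pyGetD count0 p.1 0 == 0 && !(PySem.Set.contains ts p.2.2)) = false := by
            simp only [Bool.and_eq_false_iff]
            right
            rw [Bool.not_eq_false']
            exact (PySem.Set.contains_iff ts p.2.2).mpr hm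
          rw [if_neg (fun hcond => by rw [hguard] at hcond; exact Bool.false_ne_true hcond)]
          obtain ⟨g1, g2, g3, g4, g5, g6, g7⟩ := pvInitB facts rules count0 L ts q hnd hiff hndq hU hD
            (fun p hp h => hder p (by simp [hp]) h)
          refine ⟨g1, g2, g3, g4, g5, g6, ?_⟩
          intro p' hp' hz'
          rcases List.mem_cons.mp hp' with rfl | hm'
          · exact g6 _ hm
          · exact g7 p' hm' hz'
        · have hguard : (PySem.List.pyGetD count0 p.1 0 == 0 && !(PySem.Set.contains ts p.2.2)) = true := by
            simp only [Bool.and_eq_true, beq_iff_eq, Bool.not_eq_true']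
            exact ⟨hz, by
              rw [← Bool.not_eq_true]
              exact fun h => hm ((PySem.Set.contains_iff _ _).mp h)⟩
          rw [if_pos hguard]
          have hadd : PySem.Set.add ts p.2.2 = ts ++ [p.2.2] := by simp [PySem.Set.add, hm]
          have hdp := hder p (by simp) hz
          have hnd' : (PySem.Set.add ts p.2.2).Nodup := PySem.Set.nodup_add ts p.2.2 hnd
          have hiff' : ∀ x, x ∈ PySem.Set.add ts p.2.2 ↔ x ∈ q ++ [p.2.2] := by
            intro y
            rw [PySem.Set.mem_add ts p.2.2 y, hiff y]
            simp [List.mem_append]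
          have hndq' : (q ++ [p.2.2]).Nodup := by
            rw [List.nodup_append]
            refine ⟨hndq, List.nodup_singleton _, ?_⟩
            intro x hx y hy he
            rw [List.mem_singleton] at hy
            subst hy; subst he
            exact hm ((hiff _).mpr hx)
          have hU' : ∀ x ∈ PySem.Set.add ts p.2.2, x ∈ pvU facts rules := by
            intro x hx
            rcases (PySem.Set.mem_add _ _ _).mp hx with h | rfl
            · exact hU x h
            · exact pvHead_mem_U hdp.2
          have hD' : ∀ x ∈ PySem.Set.add ts p.2.2, pvDeriv facts rules x := by
            intro x hx
            rcases (PySem.Set.mem_add _ _ _).mp hx with h | rfl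
            · exact hD x h
            · exact hdp.1
          obtain ⟨g1, g2, g3, g4, g5, g6, g7⟩ := pvInitB facts rules count0 L (PySem.Set.add ts p.2.2) (q ++ [p.2.2])
            hnd' hiff' hndq' hU' hD' (fun p hp h => hder p (by simp [hp]) h)
          refine ⟨g1, g2, g3, g4, g5, ?_, ?_⟩
          · intro x hx
            exact g6 x ((PySem.Set.mem_add _ _ _).mpr (Or.inl hx))
          · intro p' hp' hz'
            rcases List.mem_cons.mp hp' with rfl | hm'
            · exact g6 _ ((PySem.Set.mem_add _ _ _).mpr (Or.inr rfl))
            · exact g7 p' hm' hz'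
      · have hguard : (PySem.List.pyGetD count0 p.1 0 == 0 && !(PySem.Set.contains ts p.2.2)) = false := by
          simp [hz]
        rw [if_neg (fun hcond => by rw [hguard] at hcond; exact Bool.false_ne_true hcond)]
        obtain ⟨g1, g2, g3, g4, g5, g6, g7⟩ := pvInitB facts rules count0 L ts q hnd hiff hndq hU hD
          (fun p hp h => hder p (by simp [hp]) h)
        refine ⟨g1, g2, g3, g4, g5, g6, ?_⟩
        intro p' hp' hz'
        rcases List.mem_cons.mp hp' with rfl | hm'
        · exact absurd hz' hz
        · exact g7 p' hm' hz'

lemma pvAssembleB (facts : List Int) (rules : List (List Int × Int)) (ts q : List Int)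
    (g1 : ts.Nodup) (g2 : ∀ x, x ∈ ts ↔ x ∈ q) (g3 : q.Nodup)
    (g4 : ∀ x ∈ ts, x ∈ pvU facts rules) (g5 : ∀ x ∈ ts, pvDeriv facts rules x)
    (g6 : ∀ x ∈ facts, x ∈ ts)
    (gfire : ∀ (k : Nat) (h : k < rules.length),
      (rules.map (fun r => (r.1.length : Int))).getD k 0 = 0 → rules[k].2 ∈ ts) :
    pvModels facts rules (pvLoopB rules (pvWatch rules) (facts.length + rules.length + 1)
      (rules.map (fun r => (r.1.length : Int))) ts q) := by
  have hcnt0 : ∀ (k : Nat) (h : k < rules.length),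
      (rules.map (fun r => (r.1.length : Int))).getD k 0 = ((rules[k].1.length : Nat) : Int) := by
    intro k hk
    rw [List.getD_eq_getElem _ _ (by simpa using hk), List.getElem_map]
  have hinvQ : PvInvQ facts rules ((rules.map (fun r => (r.1.length : Int))), ts, q) :=
    { ndts := g1
      ndq := g3
      qsub := fun x hx => (g2 x).mpr hx
      hU := g4
      hD := g5
      clen := by simp
      cnt := by
        intro k hk
        rw [hcnt0 k hk]
        have : pvCnt ts q (rules[k].1) = (rules[k].1).length := by
          apply List.countP_eq_length.mpr
          intro b hb
          by_cases hbm : b ∈ ts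
          · simp [(g2 b).mp hbm]
          · simp [hbm]
        rw [this]
      fire := gfire }
  have hmeas : q.length + pvMiss rules ts < facts.length + rules.length + 1 := by
    have hql : q.length = ts.length :=
      (((List.perm_ext_iff_of_nodup g1 g3).mpr g2).length_eq).symm
    have hcard1 : ((rules.map (fun r => r.2)).toFinset \ ts.toFinset).card + ts.toFinset.card
        = ((rules.map (fun r => r.2)).toFinset ∪ ts.toFinset).card :=
      Finset.card_sdiff_add_card _ _
    have hTcard : ts.toFinset.card = ts.length := List.toFinset_card_of_nodup g1
    have hsub : (rules.map (fun r => r.2)).toFinset ∪ ts.toFinset ⊆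
        (rules.map (fun r => r.2)).toFinset ∪ facts.toFinset := by
      intro x hx
      rcases Finset.mem_union.mp hx with h | h
      · exact Finset.mem_union.mpr (Or.inl h)
      · have hxT : x ∈ ts := List.mem_toFinset.mp h
        have := g4 x hxT
        rw [pvU, PySem.Set.mem_ofList] at this
        rcases List.mem_append.mp this with h2 | h2
        · exact Finset.mem_union.mpr (Or.inr (List.mem_toFinset.mpr h2))
        · exact Finset.mem_union.mpr (Or.inl (List.mem_toFinset.mpr h2))
    have hub : ((rules.map (fun r => r.2)).toFinset ∪ facts.toFinset).card ≤
        rules.length + facts.length := by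
      calc ((rules.map (fun r => r.2)).toFinset ∪ facts.toFinset).card
          ≤ (rules.map (fun r => r.2)).toFinset.card + facts.toFinset.card :=
            Finset.card_union_le _ _
        _ ≤ rules.length + facts.length := by
            have h1 := List.toFinset_card_le (rules.map (fun r => r.2))
            have h2 := List.toFinset_card_le facts
            simp only [List.length_map] at h1
            omega
    have hle := Finset.card_le_card hsub
    rw [pvMiss]
    omega
  obtain ⟨l1, l2, l3, l4⟩ := pvLoopB_spec facts rules (pvWatch rules) (pvWatch_getD rules)
    (facts.length + rules.length + 1) _ _ _ hinvQ hmeas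
  exact ⟨l2, l3, fun x hx => l1 x (g6 x hx), l4⟩

lemma pvModels_B (facts : List Int) (rules : List (List Int × Int)) :
    pvModels facts rules
      (let ts0 := PySem.Set.ofList facts
       let count0 := rules.map (fun r => (r.1.length : Int))
       let st := (PySem.List.enumerate rules).foldl
         (fun (st : List Int × List Int) p =>
           if PySem.List.pyGetD count0 p.1 0 == 0 && !(PySem.Set.contains st.1 p.2.2)
           then (PySem.Set.add st.1 p.2.2, st.2 ++ [p.2.2])
           else st)
         (ts0, ts0)
       pvLoopB rules (pvWatch rules) (facts.length + rules.length + 1) count0 st.1 st.2) := by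
  obtain ⟨g1, g2, g3, g4, g5, g6, g7⟩ :=
    pvInitB facts rules (rules.map (fun r => (r.1.length : Int))) (PySem.List.enumerate rules)
      (PySem.Set.ofList facts) (PySem.Set.ofList facts)
      (PySem.Set.nodup_ofList _) (fun x => Iff.rfl) (PySem.Set.nodup_ofList _)
      (by
        intro x hx
        have : x ∈ facts := (PySem.Set.mem_ofList _ _).mp hx
        simp [pvU, PySem.Set.mem_ofList, this])
      (fun x hx => pvDeriv.fact ((PySem.Set.mem_ofList _ _).mp hx))
      (by
        intro p hp hz
        obtain ⟨k, hk, rfl⟩ := (PySem.List.mem_enumerate_iff _ _ _).mp hp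
        have hg : PySem.List.pyGetD (rules.map (fun r => (r.1.length : Int))) (0 + (k : Int)) 0
            = (rules.map (fun r => (r.1.length : Int))).getD k 0 := by
          rw [show (0 + (k : Int)) = ((k : Nat) : Int) by omega]
          exact PySem.List.pyGetD_natCast _ _ _
        rw [hg, List.getD_eq_getElem _ _ (by simpa using hk), List.getElem_map] at hz
        have hbody : rules[k].1 = [] := by
          apply List.eq_nil_of_length_eq_zero
          exact_mod_cast hz
        refine ⟨pvDeriv.step (List.getElem_mem hk) ?_, List.getElem_mem hk⟩
        intro b hb
        rw [hbody] at hb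
        simp at hb)
  exact pvAssembleB facts rules _ _ g1 g2 g3 g4 g5
    (fun x hx => g6 x ((PySem.Set.mem_ofList _ _).mpr hx))
    (by
      intro k hk hz
      apply g7 ((0 : Int) + (k : Int), rules[k]) ((PySem.List.mem_enumerate_iff _ _ _).mpr ⟨k, hk, rfl⟩)
      have hg : PySem.List.pyGetD (rules.map (fun r => (r.1.length : Int))) (0 + (k : Int)) 0
          = (rules.map (fun r => (r.1.length : Int))).getD k 0 := by
        rw [show (0 + (k : Int)) = ((k : Nat) : Int) by omega]
        exact PySem.List.pyGetD_natCast _ _ _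
      rw [hg]
      exact hz)

-- ===== VERDICT (by name: the statement is the Claim_ definition above) =====
theorem compute_least_model_py_spec : Claim_equal_compute_least_model_py := by
  intro facts rules _
  show _ = _
  unfold compute_least_model_py compute_least_model_py_alt
  have hA := pvModels_A facts rules
  have hB := pvModels_B facts rules
  exact PySem.List.sorted_eq_sorted_of_perm _ _ _ (fun a b h => h)
    ((List.perm_ext_iff_of_nodup hA.1 hB.1).mpr (pvModels_mem hA hB))
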